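-- pv_equiv track=rewrite | github.com/zuyuchen20-cloud/learning | app.py | dietary_check
-- ===== SOURCE A (Python) =====
-- def dietary_check(diet_preference: str, recipe_diet: str) -> bool:
--     """
--     Check if a recipe matches the selected dietary preference.
--
--     Args:
--         diet_preference: The dietary preference selected by user ("Vegan", "Halal", "Low-carb")
--         recipe_diet: The diet category from the recipe's 'Diet' column
--
--     Returns:
--         bool: True if the recipe matches the dietary preference, False otherwise
--     """
--     if not diet_preference:
--         return True
--
--     # Convert recipe diet string to lowercase for case-insensitive matching
--     recipe_diet_lower = str(recipe_diet).lower()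
--
--     # Check for specific dietary preferences
--     if diet_preference == "Vegan":
--         # Vegan matches vegetarian recipes (since all vegetarian recipes are vegan-suitable)
--         return "vegetarian" in recipe_diet_lower
--     elif diet_preference == "Halal":
--         # Check if recipe contains "halal" in its diet description
--         return "halal" in recipe_diet_lower
--     elif diet_preference == "Low-carb":
--         # Check if recipe contains "low-carb", "low carb", or similar terms
--         return any(term in recipe_diet_lower for term in ["low-carb", "low carb", "keto", "low carbohydrate"])
--
--     return True
-- ===== SOURCE B (Python) =====
-- # Flat rule list: each (keyword, preference) pair says the keyword satisfies that preference.
-- _RULES = [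
--     ("vegetarian", "Vegan"),
--     ("halal", "Halal"),
--     ("low-carb", "Low-carb"),
--     ("low carb", "Low-carb"),
--     ("keto", "Low-carb"),
--     ("low carbohydrate", "Low-carb"),
-- ]
--
--
-- def dietary_check(diet_preference: str, recipe_diet: str) -> bool:
--     recipe_diet_lower = str(recipe_diet).lower()
--     known = set()
--     satisfied = set()
--     for keyword, preference in _RULES:
--         known.add(preference)
--         if keyword in recipe_diet_lower:
--             satisfied.add(preference)
--     if diet_preference not in known:
--         return True
--     return diet_preference in satisfied
-- ===== Notes on version B (the rewrite author's own statement) =====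
-- stated objective: alternative
-- what changed: Instead of dispatching on the preference and testing only its keywords, B scans one flat (keyword, preference) rule list, building the set of preferences the recipe satisfies and the set of known preferences, then answers by two membership tests (unknown/empty preferences fall outside the known set and default to True).
import Mathlib
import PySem

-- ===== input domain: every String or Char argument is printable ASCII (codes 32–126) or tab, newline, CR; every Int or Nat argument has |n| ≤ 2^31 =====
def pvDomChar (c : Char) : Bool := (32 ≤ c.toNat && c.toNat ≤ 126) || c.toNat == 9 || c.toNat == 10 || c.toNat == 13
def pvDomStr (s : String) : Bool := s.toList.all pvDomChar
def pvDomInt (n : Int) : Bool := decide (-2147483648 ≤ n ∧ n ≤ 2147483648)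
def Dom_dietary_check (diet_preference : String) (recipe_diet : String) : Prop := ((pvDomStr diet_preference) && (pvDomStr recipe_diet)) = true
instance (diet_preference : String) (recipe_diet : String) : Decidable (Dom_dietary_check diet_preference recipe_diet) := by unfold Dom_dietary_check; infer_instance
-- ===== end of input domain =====

-- B replaces A's preference-dispatch branches by one scan over a flat (keyword, preference)
-- rule list collecting the satisfied-preference set, then two membership tests; alternative structure, same cost.

-- ===== PORT A =====
def dietary_check (diet_preference : String) (recipe_diet : String) : Bool :=
  if diet_preference == "" then true
  else
    let recipe_diet_lower := PySem.Str.lower recipe_diet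
    if diet_preference == "Vegan" then
      PySem.Str.isIn "vegetarian" recipe_diet_lower
    else if diet_preference == "Halal" then
      PySem.Str.isIn "halal" recipe_diet_lower
    else if diet_preference == "Low-carb" then
      (["low-carb", "low carb", "keto", "low carbohydrate"] : List String).any
        (fun term => PySem.Str.isIn term recipe_diet_lower)
    else true

-- ===== PORT B =====
def pvRules : List (String × String) :=
  [("vegetarian", "Vegan"),
   ("halal", "Halal"),
   ("low-carb", "Low-carb"),
   ("low carb", "Low-carb"),
   ("keto", "Low-carb"),
   ("low carbohydrate", "Low-carb")]

def dietary_check_alt (diet_preference : String) (recipe_diet : String) : Bool :=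
  let recipe_diet_lower := PySem.Str.lower recipe_diet
  let sets := pvRules.foldl
    (fun (st : PySem.Set String × PySem.Set String) rule =>
      (PySem.Set.add st.1 rule.2,
       if PySem.Str.isIn rule.1 recipe_diet_lower then PySem.Set.add st.2 rule.2 else st.2))
    (PySem.Set.empty, PySem.Set.empty)
  if ¬ (PySem.Set.contains sets.1 diet_preference) then true
  else PySem.Set.contains sets.2 diet_preference

-- ===== PRECONDITION & SPEC =====
def Spec_dietary_check (diet_preference : String) (recipe_diet : String) (out : Bool) : Prop := out = dietary_check_alt diet_preference recipe_diet
instance (diet_preference : String) (recipe_diet : String) (out : Bool) : Decidable (Spec_dietary_check diet_preference recipe_diet out) := by unfold Spec_dietary_check; infer_instance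

-- ===== CLAIM =====
def Claim_equal_dietary_check : Prop := ∀ (diet_preference : String) (recipe_diet : String), Dom_dietary_check diet_preference recipe_diet → Spec_dietary_check diet_preference recipe_diet (dietary_check diet_preference recipe_diet)

-- ===== LEMMAS AND PROOFS =====
theorem dietary_check_spec : Claim_equal_dietary_check := by
  intro dp rd _
  unfold Spec_dietary_check dietary_check dietary_check_alt pvRules
  simp only [List.foldl, List.any_cons, List.any_nil]
  generalize PySem.Str.isIn "vegetarian" (PySem.Str.lower rd) = b1
  generalize PySem.Str.isIn "halal" (PySem.Str.lower rd) = b2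
  generalize PySem.Str.isIn "low-carb" (PySem.Str.lower rd) = b3
  generalize PySem.Str.isIn "low carb" (PySem.Str.lower rd) = b4
  generalize PySem.Str.isIn "keto" (PySem.Str.lower rd) = b5
  generalize PySem.Str.isIn "low carbohydrate" (PySem.Str.lower rd) = b6
  by_cases h1 : dp = "Vegan"
  · subst h1
    cases b1 <;> cases b2 <;> cases b3 <;> cases b4 <;> cases b5 <;> cases b6 <;> decide
  by_cases h2 : dp = "Halal"
  · subst h2
    cases b1 <;> cases b2 <;> cases b3 <;> cases b4 <;> cases b5 <;> cases b6 <;> decide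
  by_cases h3 : dp = "Low-carb"
  · subst h3
    cases b1 <;> cases b2 <;> cases b3 <;> cases b4 <;> cases b5 <;> cases b6 <;> decide
  · -- dp (possibly empty) is not a known preference: both sides return true
    cases b1 <;> cases b2 <;> cases b3 <;> cases b4 <;> cases b5 <;> cases b6 <;>
      simp [PySem.Set.contains, PySem.Set.add, PySem.Set.empty, h1, h2, h3]
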